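-- pv_equiv track=rewrite | github.com/mohammed1916/behavior_tracking | backend/scripts/commit_message_generator.py | determine_scope
-- ===== SOURCE A (Python) =====
-- from typing import List, Dict, Tuple, Optional
--
-- def determine_scope(files: List[str]) -> Optional[str]:
--     """Determine the scope of changes based on affected files."""
--     if not files:
--         return None
--
--     # Check for backend changes
--     backend_files = [f for f in files if 'backend' in f]
--     if backend_files:
--         # More specific backend scopes
--         if any('server' in f for f in backend_files):
--             return 'server'
--         if any('script' in f for f in backend_files):
--             return 'scripts'
--         return 'backend'
--
--     # Check for frontend changes
--     frontend_files = [f for f in files if 'frontend' in f]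
--     if frontend_files:
--         if any('component' in f for f in frontend_files):
--             return 'components'
--         if any('App.jsx' in f or 'main.jsx' in f for f in frontend_files):
--             return 'app'
--         return 'frontend'
--
--     # Check for data changes
--     if any('data' in f for f in files):
--         return 'data'
--
--     # Check for config changes
--     if any(f in ['package.json', '.gitignore', 'requirements.txt'] for f in files):
--         return 'config'
--
--     return None
-- ===== SOURCE B (Python) =====
-- from typing import List, Optional
--
-- def determine_scope(files: List[str]) -> Optional[str]:
--     """Single pass over files accumulating boolean flags, then one precedence tree."""
--     if not files:
--         return None
--     has_backend = backend_server = backend_script = False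
--     has_frontend = frontend_component = frontend_app = False
--     has_data = has_config = False
--     for f in files:
--         bk = 'backend' in f
--         fr = 'frontend' in f
--         has_backend = has_backend or bk
--         backend_server = backend_server or (bk and 'server' in f)
--         backend_script = backend_script or (bk and 'script' in f)
--         has_frontend = has_frontend or fr
--         frontend_component = frontend_component or (fr and 'component' in f)
--         frontend_app = frontend_app or (fr and ('App.jsx' in f or 'main.jsx' in f))
--         has_data = has_data or 'data' in f
--         has_config = has_config or f in ('package.json', '.gitignore', 'requirements.txt')
--     if has_backend:
--         if backend_server:
--             return 'server'
--         if backend_script: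
--             return 'scripts'
--         return 'backend'
--     if has_frontend:
--         if frontend_component:
--             return 'components'
--         if frontend_app:
--             return 'app'
--         return 'frontend'
--     if has_data:
--         return 'data'
--     if has_config:
--         return 'config'
--     return None
-- ===== Notes on version B (the rewrite author's own statement) =====
-- stated objective: alternative
-- what changed: Replaces A's filtered sublists and repeated any()-scans with a single pass over files that accumulates eight boolean flags, followed by the same precedence tree on the flags.
import Mathlib
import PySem

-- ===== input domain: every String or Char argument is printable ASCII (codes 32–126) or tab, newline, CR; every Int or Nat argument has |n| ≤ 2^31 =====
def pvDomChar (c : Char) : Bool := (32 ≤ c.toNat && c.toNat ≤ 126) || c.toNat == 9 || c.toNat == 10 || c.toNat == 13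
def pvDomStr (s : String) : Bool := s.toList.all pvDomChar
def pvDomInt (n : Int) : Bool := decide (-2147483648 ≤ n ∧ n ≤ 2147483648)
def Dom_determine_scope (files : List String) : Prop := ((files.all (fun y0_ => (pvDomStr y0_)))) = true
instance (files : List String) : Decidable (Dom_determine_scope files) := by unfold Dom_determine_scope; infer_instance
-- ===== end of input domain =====

-- B: one pass accumulating flags instead of A's filtered sublists and repeated any-scans (objective: alternative decomposition).

-- ===== PORT A =====
def determine_scope (files : List String) : Option String :=
  if files = [] then none
  else
    let backend_files := files.filter (fun f => PySem.Str.isIn "backend" f)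
    if backend_files ≠ [] then
      if backend_files.any (fun f => PySem.Str.isIn "server" f) then some "server"
      else if backend_files.any (fun f => PySem.Str.isIn "script" f) then some "scripts"
      else some "backend"
    else
      let frontend_files := files.filter (fun f => PySem.Str.isIn "frontend" f)
      if frontend_files ≠ [] then
        if frontend_files.any (fun f => PySem.Str.isIn "component" f) then some "components"
        else if frontend_files.any (fun f => PySem.Str.isIn "App.jsx" f || PySem.Str.isIn "main.jsx" f) then some "app"
        else some "frontend"
      else if files.any (fun f => PySem.Str.isIn "data" f) then some "data"
      else if files.any (fun f => f == "package.json" || f == ".gitignore" || f == "requirements.txt") then some "config"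
      else none

-- ===== PORT B =====
structure ScopeFlags where
  hasBackend : Bool
  backendServer : Bool
  backendScript : Bool
  hasFrontend : Bool
  frontendComponent : Bool
  frontendApp : Bool
  hasData : Bool
  hasConfig : Bool
deriving DecidableEq, Repr

def scopeStep (s : ScopeFlags) (f : String) : ScopeFlags :=
  let bk := PySem.Str.isIn "backend" f
  let fr := PySem.Str.isIn "frontend" f
  { hasBackend := s.hasBackend || bk
    backendServer := s.backendServer || (bk && PySem.Str.isIn "server" f)
    backendScript := s.backendScript || (bk && PySem.Str.isIn "script" f)
    hasFrontend := s.hasFrontend || fr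
    frontendComponent := s.frontendComponent || (fr && PySem.Str.isIn "component" f)
    frontendApp := s.frontendApp || (fr && (PySem.Str.isIn "App.jsx" f || PySem.Str.isIn "main.jsx" f))
    hasData := s.hasData || PySem.Str.isIn "data" f
    hasConfig := s.hasConfig || (f == "package.json" || f == ".gitignore" || f == "requirements.txt") }

def determine_scope_alt (files : List String) : Option String :=
  if files = [] then none
  else
    let s := files.foldl scopeStep ⟨false, false, false, false, false, false, false, false⟩
    if s.hasBackend then
      if s.backendServer then some "server"
      else if s.backendScript then some "scripts"
      else some "backend"
    else if s.hasFrontend then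
      if s.frontendComponent then some "components"
      else if s.frontendApp then some "app"
      else some "frontend"
    else if s.hasData then some "data"
    else if s.hasConfig then some "config"
    else none

-- ===== PRECONDITION & SPEC =====
def Spec_determine_scope (files : List String) (out : Option String) : Prop := out = determine_scope_alt files
instance (files : List String) (out : Option String) : Decidable (Spec_determine_scope files out) := by unfold Spec_determine_scope; infer_instance

-- ===== CLAIM (what is proved, stated in full; the proofs are below) =====
def Claim_equal_determine_scope : Prop := ∀ (files : List String), Dom_determine_scope files → Spec_determine_scope files (determine_scope files)

-- ===== LEMMAS AND PROOFS =====
lemma foldl_scopeStep (files : List String) (init : ScopeFlags) :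
    files.foldl scopeStep init =
      { hasBackend := init.hasBackend || files.any (fun f => PySem.Str.isIn "backend" f)
        backendServer := init.backendServer || files.any (fun f => PySem.Str.isIn "backend" f && PySem.Str.isIn "server" f)
        backendScript := init.backendScript || files.any (fun f => PySem.Str.isIn "backend" f && PySem.Str.isIn "script" f)
        hasFrontend := init.hasFrontend || files.any (fun f => PySem.Str.isIn "frontend" f)
        frontendComponent := init.frontendComponent || files.any (fun f => PySem.Str.isIn "frontend" f && PySem.Str.isIn "component" f)
        frontendApp := init.frontendApp || files.any (fun f => PySem.Str.isIn "frontend" f && (PySem.Str.isIn "App.jsx" f || PySem.Str.isIn "main.jsx" f))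
        hasData := init.hasData || files.any (fun f => PySem.Str.isIn "data" f)
        hasConfig := init.hasConfig || files.any (fun f => f == "package.json" || f == ".gitignore" || f == "requirements.txt") } := by
  induction files generalizing init with
  | nil => simp
  | cons f fs ih => simp [scopeStep, ih, Bool.or_assoc]

-- ===== VERDICT (by name: the statement is the Claim_ definition above) =====
theorem determine_scope_spec : Claim_equal_determine_scope := by
  intro files _
  unfold Spec_determine_scope determine_scope determine_scope_alt
  by_cases hnil : files = []
  · simp [hnil]
  · simp [hnil, foldl_scopeStep]
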